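-- pv_equiv track=rewrite | github.com/jesserodri/automatizarWhatsappNumero | main.py | check_caracter
-- ===== SOURCE A (Python) =====
-- def check_caracter(string):
-- #docstring
--     """
--     -> Essa função conta quantos espaços e/ou
--     outros caracteres especificados pelos if/elif da função
--     """
--
--     count = 0
--
--     for i in string:
--         if i == " ":
--             count += 1
--         elif i == "-":
--             count += 1
--         elif i == "(":
--             count += 1
--         elif i == ")":
--             count += 1
--         elif i == "+":
--             count += 1
--
--     return count
-- ===== SOURCE B (Python) =====
-- def check_caracter(string):
--     # Build a frequency table of the whole input in one pass,
--     # then sum the counts of the five target characters.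
--     freq = {}
--     for ch in string:
--         freq[ch] = freq.get(ch, 0) + 1
--     total = 0
--     for ch in " -()+":
--         total += freq.get(ch, 0)
--     return total
-- ===== Notes on version B (the rewrite author's own statement) =====
-- stated objective: alternative
-- what changed: B replaces A's inline if/elif scan with a build-a-frequency-table pass over the input followed by a lookup-and-sum pass over the five target characters.
import Mathlib
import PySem

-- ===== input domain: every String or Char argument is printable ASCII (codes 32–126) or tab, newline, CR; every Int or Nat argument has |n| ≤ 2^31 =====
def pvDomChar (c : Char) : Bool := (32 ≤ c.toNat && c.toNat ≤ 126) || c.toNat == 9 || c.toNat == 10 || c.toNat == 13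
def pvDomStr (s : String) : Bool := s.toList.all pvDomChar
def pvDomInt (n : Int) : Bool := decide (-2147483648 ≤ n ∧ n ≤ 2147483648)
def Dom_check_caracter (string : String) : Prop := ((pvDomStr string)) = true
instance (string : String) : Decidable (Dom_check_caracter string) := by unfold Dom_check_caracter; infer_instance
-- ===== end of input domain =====

-- B replaces A's inline if/elif scan with a frequency table built in one pass, then sums the five target characters' counts (alternative decomposition, same cost).
-- ===== PORT A =====
def check_caracter (string : String) : Int :=
  string.toList.foldl (fun count i =>
    if i = ' ' then count + 1
    else if i = '-' then count + 1
    else if i = '(' then count + 1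
    else if i = ')' then count + 1
    else if i = '+' then count + 1
    else count) (0 : Int)

-- ===== PORT B =====
def check_caracter_alt (string : String) : Int :=
  let freq : PySem.Dict Char Int :=
    string.toList.foldl (fun d ch => d.modify ch 0 (· + 1)) PySem.Dict.empty
  " -()+".toList.foldl (fun total ch => total + freq.getD ch 0) (0 : Int)

-- ===== PRECONDITION & SPEC =====
def Spec_check_caracter (string : String) (out : Int) : Prop := out = check_caracter_alt string
instance (string : String) (out : Int) : Decidable (Spec_check_caracter string out) := by unfold Spec_check_caracter; infer_instance

-- ===== CLAIM (what is proved, stated in full; the proofs are below) =====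
def Claim_equal_check_caracter : Prop := ∀ (string : String), Dom_check_caracter string → Spec_check_caracter string (check_caracter string)

-- ===== LEMMAS AND PROOFS =====

theorem check_caracter_foldl_counts (l : List Char) (c : Int) :
    l.foldl (fun count i =>
      if i = ' ' then count + 1
      else if i = '-' then count + 1
      else if i = '(' then count + 1
      else if i = ')' then count + 1
      else if i = '+' then count + 1
      else count) c
    = c + l.count ' ' + l.count '-' + l.count '(' + l.count ')' + l.count '+' := by
  induction l generalizing c with
  | nil => simp
  | cons x xs ih =>
    simp only [List.foldl_cons, List.count_cons, ih]
    by_cases h1 : x = ' ' <;> by_cases h2 : x = '-' <;> by_cases h3 : x = '(' <;>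
      by_cases h4 : x = ')' <;> by_cases h5 : x = '+' <;>
      simp_all <;> push_cast <;> try ring


-- ===== VERDICT (by name: the statement is the Claim_ definition above) =====
theorem check_caracter_spec : Claim_equal_check_caracter := by
  intro string _
  show check_caracter string = check_caracter_alt string
  unfold check_caracter check_caracter_alt
  rw [check_caracter_foldl_counts, ← PySem.Dict.counter_eq_foldl]
  simp [PySem.Dict.getD_counter]
  try ring
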